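-- pv_equiv track=rewrite | github.com/Tejasri2111/A-December-Of-Algorithms-2025 | December - 08/Tejasri2111_Cafeteria Queue Challenge.py | countStudentsCannotEat
-- ===== SOURCE A (Python) =====
-- from collections import deque
--
-- def countStudentsCannotEat(students, sandwiches):
--     queue = deque(students)
--     stack = sandwiches[:]  # copy of sandwiches
--
--     count = 0  # to track consecutive students who can't eat
--
--     while queue and count < len(queue):
--         if queue[0] == stack[0]:
--             queue.popleft()
--             stack.pop(0)
--             count = 0  # reset since someone ate
--         else:
--             queue.append(queue.popleft())
--             count += 1
--
--     return len(queue)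
-- ===== SOURCE B (Python) =====
-- from collections import Counter
--
-- def countStudentsCannotEat(students, sandwiches):
--     remaining = Counter(students)
--     served = 0
--     for s in sandwiches:
--         if remaining[s] == 0:
--             break
--         remaining[s] -= 1
--         served += 1
--     return len(students) - served
-- ===== Notes on version B (the rewrite author's own statement) =====
-- stated objective: alternative
-- what changed: Replaces the queue-rotation simulation (deque rotations plus O(n) stack.pop(0)) with a single counting pass: tally student preferences with a Counter and serve sandwiches greedily until one has no taker; queue order never matters because the queue rotates fully. Intended as asymptotically faster (O(n) vs O(n^2) worst case), measured only ~1.4x on random inputs where A's loop also terminates early.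
-- outside the precondition, e.g. on countStudentsCannotEat([1, 2], [3]): A returns 2, B returns 2
import Mathlib
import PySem

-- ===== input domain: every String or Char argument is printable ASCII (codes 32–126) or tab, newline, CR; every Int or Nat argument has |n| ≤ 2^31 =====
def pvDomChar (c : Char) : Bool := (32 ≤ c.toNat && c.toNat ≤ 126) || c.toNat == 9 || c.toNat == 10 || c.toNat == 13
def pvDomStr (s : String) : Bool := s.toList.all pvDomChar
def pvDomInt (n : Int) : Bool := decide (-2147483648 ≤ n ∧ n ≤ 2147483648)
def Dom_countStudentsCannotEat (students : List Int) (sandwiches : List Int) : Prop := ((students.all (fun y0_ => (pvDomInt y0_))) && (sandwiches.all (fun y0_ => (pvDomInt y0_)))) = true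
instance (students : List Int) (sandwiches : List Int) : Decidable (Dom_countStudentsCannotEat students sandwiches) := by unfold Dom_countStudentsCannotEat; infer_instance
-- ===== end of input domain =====

-- B replaces A's queue-rotation simulation by a single counting pass (Counter + greedy serve); proved equal on Pre_ (len(students) <= len(sandwiches)).


-- ===== PORT A =====
-- the while loop of A: state (queue, stack, count); on a match both fronts are popped
-- and count resets, otherwise the front student is rotated to the back and count grows.
def pvALoop (queue : List Int) (stack : List Int) (count : Nat) : Nat :=
  if _h : queue ≠ [] ∧ count < queue.length then
    match queue, stack with
    | q :: qs, s :: ss =>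
      if q = s then pvALoop qs ss 0
      else pvALoop (qs ++ [q]) (s :: ss) (count + 1)
    | q :: qs, [] => (q :: qs).length  -- Python raises IndexError here (stack[0] on empty stack); excluded by Pre_
    | [], _ => 0
  else queue.length
termination_by (queue.length, queue.length - count)
decreasing_by
  · exact Prod.Lex.left _ _ (by simp)
  · have h2 := _h.2
    simp only [List.length_cons] at h2
    simp only [List.length_append, List.length_cons, List.length_nil, Nat.zero_add]
    exact Prod.Lex.right _ (by omega)

def countStudentsCannotEat (students : List Int) (sandwiches : List Int) : Int :=
  (pvALoop students sandwiches 0 : Int)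

-- ===== PORT B =====
-- the for loop of B: serve sandwiches while the Counter has a taker, break otherwise.
def pvBLoop : PySem.Dict Int Int → List Int → Int → Int
  | _, [], served => served
  | remaining, s :: ss, served =>
    if remaining.getD s 0 = 0 then served
    else pvBLoop (remaining.insert s (remaining.getD s 0 - 1)) ss (served + 1)

def countStudentsCannotEat_alt (students : List Int) (sandwiches : List Int) : Int :=
  (students.length : Int) - pvBLoop (PySem.Dict.counter students) sandwiches 0

-- ===== PRECONDITION & SPEC =====
-- Pre_ excludes inputs with fewer sandwiches than students: there A raises IndexError whenever
-- its simulation consumes every sandwich while students remain; the excluded region also contains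
-- inputs where A returns (when it gets stuck early), on which B happens to return the same value.
def Pre_countStudentsCannotEat (students : List Int) (sandwiches : List Int) : Prop :=
  students.length ≤ sandwiches.length
instance (students : List Int) (sandwiches : List Int) : Decidable (Pre_countStudentsCannotEat students sandwiches) := by unfold Pre_countStudentsCannotEat; infer_instance
def pvWitness_countStudentsCannotEat : List Int × List Int := ([1, 0, 1], [0, 1, 1])

def Spec_countStudentsCannotEat (students : List Int) (sandwiches : List Int) (out : Int) : Prop := out = countStudentsCannotEat_alt students sandwiches
instance (students : List Int) (sandwiches : List Int) (out : Int) : Decidable (Spec_countStudentsCannotEat students sandwiches out) := by unfold Spec_countStudentsCannotEat; infer_instance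

-- ===== CLAIM (what is proved, stated in full; the proofs are below) =====
def Claim_equal_countStudentsCannotEat : Prop := ∀ (students : List Int) (sandwiches : List Int), Dom_countStudentsCannotEat students sandwiches → Pre_countStudentsCannotEat students sandwiches → Spec_countStudentsCannotEat students sandwiches (countStudentsCannotEat students sandwiches)

-- ===== LEMMAS AND PROOFS =====

-- greedy on the multiset of students: how many sandwiches get served
def pvGreedy : List Int → List Int → Nat
  | _, [] => 0
  | qs, s :: ss => if qs.count s = 0 then 0 else pvGreedy (qs.erase s) ss + 1

theorem pvGreedy_le (qs st : List Int) : pvGreedy qs st ≤ qs.length := by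
  induction st generalizing qs with
  | nil => simp [pvGreedy]
  | cons s ss ih =>
    rw [pvGreedy]
    by_cases hz : qs.count s = 0
    · simp [hz]
    · rw [if_neg hz]
      have hm : s ∈ qs := List.count_pos_iff.mp (Nat.pos_of_ne_zero hz)
      have h1 := ih (qs.erase s)
      have hl : (qs.erase s).length = qs.length - 1 := List.length_erase_of_mem hm
      have hlen : 0 < qs.length := List.length_pos_of_mem hm
      omega

theorem pvGreedy_perm {qs qs' : List Int} (h : qs.Perm qs') (st : List Int) :
    pvGreedy qs st = pvGreedy qs' st := by
  induction st generalizing qs qs' with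
  | nil => rfl
  | cons s ss ih =>
    simp only [pvGreedy, h.count_eq]
    split
    · rfl
    · rw [ih (h.erase s)]

-- the core simulation lemma: under the rotation invariant, A's loop returns
-- queue.length minus the number of sandwiches the greedy serves.
theorem pvALoop_eq (queue stack : List Int) (count : Nat) :
    count ≤ queue.length →
    (∀ x ∈ queue.drop (queue.length - count), ∀ s, stack.head? = some s → x ≠ s) →
    pvALoop queue stack count = queue.length - pvGreedy queue stack := by
  induction queue, stack, count using pvALoop.induct with
  | case1 count qs s ss h ih =>
    intro _hc _hinv
    rw [pvALoop, dif_pos h]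
    dsimp only
    rw [if_pos rfl, ih (by omega) (by simp)]
    have h1 : ¬ (s :: qs).count s = 0 := by simp
    simp only [pvGreedy, if_neg h1, List.erase_cons_head, List.length_cons]
    have := pvGreedy_le qs ss
    omega
  | case2 count q qs s ss h hne ih =>
    intro _hc hinv
    rw [pvALoop, dif_pos h]
    dsimp only
    rw [if_neg hne]
    have hlt : count < qs.length + 1 := by simpa using h.2
    have hinv' : ∀ x ∈ (qs ++ [q]).drop ((qs ++ [q]).length - (count + 1)),
        ∀ t, (s :: ss).head? = some t → x ≠ t := by
      intro x hx t ht
      simp only [List.head?_cons, Option.some.injEq] at ht; subst ht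
      have hlen : (qs ++ [q]).length - (count + 1) = qs.length - count := by simp
      rw [hlen, List.drop_append_of_le_length (by omega)] at hx
      rcases List.mem_append.mp hx with hx | hx
      · have hx' : x ∈ (q :: qs).drop ((q :: qs).length - count) := by
          have hl : (q :: qs).length - count = (qs.length - count) + 1 := by simp; omega
          rw [hl]; simpa using hx
        exact hinv x hx' s (by simp)
      · simp only [List.mem_singleton] at hx; subst hx; exact hne
    rw [ih (by simp; omega) hinv']
    rw [pvGreedy_perm (List.perm_append_singleton q qs) (s :: ss)]
    simp
  | case3 count q qs h =>
    -- stack empty while the loop condition holds: Python raises here; outside Pre_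
    intro _ _
    rw [pvALoop, dif_pos h]
    dsimp only
    simp [pvGreedy]
  | case4 stack count h =>
    exact absurd h (by simp)
  | case5 queue stack count h =>
    intro hc hinv
    rw [pvALoop, dif_neg h]
    cases queue with
    | nil => cases stack <;> simp [pvGreedy]
    | cons q qs =>
      have hnlt : ¬ count < (q :: qs).length := fun hlt => h ⟨by simp, hlt⟩
      have hcount : count = qs.length + 1 := by simp only [List.length_cons] at hnlt hc; omega
      cases stack with
      | nil => simp [pvGreedy]
      | cons s ss =>
        have hdrop : (q :: qs).length - count = 0 := by simp [hcount]
        have hzero : (q :: qs).count s = 0 := by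
          rw [List.count_eq_zero]
          intro hm
          exact hinv s (by rw [hdrop]; simpa using hm) s (by simp) rfl
        simp [pvGreedy, hzero]

-- B's loop computes served + greedy, provided the dict tracks the multiset counts.
theorem pvBLoop_eq (st : List Int) (qs : List Int) (rem : PySem.Dict Int Int) (served : Int)
    (h : ∀ t, rem.getD t 0 = (qs.count t : Int)) :
    pvBLoop rem st served = served + (pvGreedy qs st : Int) := by
  induction st generalizing qs rem served with
  | nil => simp [pvBLoop, pvGreedy]
  | cons s ss ih =>
    simp only [pvBLoop, pvGreedy, h s]
    by_cases hz : qs.count s = 0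
    · simp [hz]
    · rw [if_neg (by exact_mod_cast hz), if_neg hz]
      have hmem : s ∈ qs := List.count_pos_iff.mp (by omega)
      have h' : ∀ t, (rem.insert s ((qs.count s : Int) - 1)).getD t 0 = ((qs.erase s).count t : Int) := by
        intro t
        rw [PySem.Dict.getD_insert]
        by_cases hts : t = s
        · rw [if_pos hts, hts, List.count_erase_self]
          have h0 : 0 < qs.count s := Nat.pos_of_ne_zero hz
          omega
        · rw [if_neg hts, h t, List.count_erase_of_ne hts]
      rw [ih (qs.erase s) _ _ h']
      push_cast
      ring

-- ===== VERDICT (by name: the statement is the Claim_ definition above) =====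
theorem countStudentsCannotEat_spec : Claim_equal_countStudentsCannotEat := by
  intro students sandwiches _hdom _hpre
  unfold Spec_countStudentsCannotEat countStudentsCannotEat countStudentsCannotEat_alt
  rw [pvALoop_eq students sandwiches 0 (by omega) (by simp)]
  rw [pvBLoop_eq sandwiches students (PySem.Dict.counter students) 0
      (fun t => PySem.Dict.getD_counter students t)]
  have := pvGreedy_le students sandwiches
  omega
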